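-- pv_equiv track=rewrite | github.com/sty0507/my_Algorithm | 프로그래머스/level1/햄버거 만들기.py | solution
-- ===== SOURCE A (Python) =====
-- def solution(ingredient):
--     front = []
--     answer = 0
--     for i in ingredient:
--         front.append(i)
--         if len(front) >= 4:
--             if front[-1] == 1 and front[-2] == 3 and front[-3] == 2 and front[-4] == 1:
--                 front.pop()
--                 front.pop()
--                 front.pop()
--                 front.pop()
--                 answer += 1
--     return answer
-- ===== SOURCE B (Python) =====
-- def solution(ingredient):
--     # Repeated leftmost-occurrence deletion instead of a single-pass stack.
--     def remove_first(lst):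
--         # return lst with the leftmost occurrence of [1,2,3,1] removed, or None
--         for i in range(len(lst)):
--             if lst[i:i + 4] == [1, 2, 3, 1]:
--                 return lst[:i] + lst[i + 4:]
--         return None
--     answer = 0
--     cur = list(ingredient)
--     while True:
--         nxt = remove_first(cur)
--         if nxt is None:
--             return answer
--         cur = nxt
--         answer += 1
-- ===== Notes on version B (the rewrite author's own statement) =====
-- stated objective: alternative
-- what changed: Replaces A's single-pass stack (push each ingredient, pop four when the top reads 1,2,3,1) by repeated leftmost-occurrence deletion: scan for the first slice equal to [1,2,3,1], delete it, count, and rescan until none remains.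
import Mathlib
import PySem

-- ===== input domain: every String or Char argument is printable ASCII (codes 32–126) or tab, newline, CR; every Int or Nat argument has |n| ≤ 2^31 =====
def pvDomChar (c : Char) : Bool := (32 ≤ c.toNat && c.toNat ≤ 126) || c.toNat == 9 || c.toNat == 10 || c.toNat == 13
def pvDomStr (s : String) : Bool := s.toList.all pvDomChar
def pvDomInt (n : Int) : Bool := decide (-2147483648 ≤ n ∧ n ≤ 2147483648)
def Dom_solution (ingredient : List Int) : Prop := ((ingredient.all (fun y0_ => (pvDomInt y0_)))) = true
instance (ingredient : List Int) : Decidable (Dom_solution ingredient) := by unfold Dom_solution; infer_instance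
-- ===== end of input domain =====

-- B replaces A's single-pass stack by repeated deletion of the leftmost [1,2,3,1] slice; same return value, no observable mutation.

-- ===== PORT A =====
-- body of A's for-loop, with 'front' (after the append) and 'answer' as explicit state
def stepAFront (front : List Int) (ans : Int) : List Int × Int :=
  if 4 ≤ front.length then
    if PySem.List.pyGet? front (-1) = some 1 ∧ PySem.List.pyGet? front (-2) = some 3 ∧
       PySem.List.pyGet? front (-3) = some 2 ∧ PySem.List.pyGet? front (-4) = some 1 then
      -- four front.pop() calls (length ≥ 4, so each pop succeeds and drops the last element)
      (front.dropLast.dropLast.dropLast.dropLast, ans + 1)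
    else (front, ans)
  else (front, ans)

def stepA (st : List Int × Int) (i : Int) : List Int × Int :=
  stepAFront (st.1 ++ [i]) st.2

def solution (ingredient : List Int) : Int :=
  (ingredient.foldl stepA ([], 0)).2

-- ===== PORT B =====
-- Source B's remove_first: scan left to right, compare the 4-slice, delete the first match
-- (the index loop 'for i in range(len(lst))' with 'lst[:i] + lst[i+4:]' is rendered as
--  structural recursion rebuilding the prefix; exact: same left-to-right first match,
--  'lst[i:i+4]' at offset i is the slice '(…).take 4' and 'lst[i+4:]' is '(…).drop 4')
def removeFirst : List Int → Option (List Int)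
  | [] => none
  | x :: rest =>
      if (x :: rest).take 4 = [1, 2, 3, 1] then some ((x :: rest).drop 4)
      else (removeFirst rest).map (x :: ·)

-- unfolding equation for the cons case (also used by the termination argument below)
theorem removeFirst_cons (x : Int) (rest : List Int) :
    removeFirst (x :: rest) =
      if (x :: rest).take 4 = [1, 2, 3, 1] then some ((x :: rest).drop 4)
      else (removeFirst rest).map (x :: ·) := rfl

-- each successful removal deletes exactly four elements (needed for altLoop's termination)
theorem removeFirst_length : ∀ {l m : List Int}, removeFirst l = some m → l.length = m.length + 4 := by
  intro l
  induction l with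
  | nil => intro m h; simp [removeFirst] at h
  | cons x rest ih =>
    intro m h
    rw [removeFirst_cons] at h
    split at h
    case isTrue ht =>
      have h4 : 4 ≤ (x :: rest).length := by
        have hmin : min 4 (x :: rest).length = 4 := by
          simpa [List.length_take] using congrArg List.length ht
        omega
      simp only [Option.some_inj] at h
      subst h
      simp only [List.length_drop]
      omega
    case isFalse hf =>
      rcases Option.map_eq_some_iff.mp h with ⟨m2, hm2, rfl⟩
      have := ih hm2
      simp [this]

-- Source B's outer while loop: delete leftmost occurrences until none remains, counting them
def altLoop (lst : List Int) (answer : Int) : Int :=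
  match h : removeFirst lst with
  | none => answer
  | some nxt => altLoop nxt (answer + 1)
termination_by lst.length
decreasing_by
  have := removeFirst_length h
  omega

def solution_alt (ingredient : List Int) : Int := altLoop ingredient 0

-- ===== PRECONDITION & SPEC =====
def Spec_solution (ingredient : List Int) (out : Int) : Prop := out = solution_alt ingredient
instance (ingredient : List Int) (out : Int) : Decidable (Spec_solution ingredient out) := by unfold Spec_solution; infer_instance

-- ===== CLAIM (what is proved, stated in full; the proofs are below) =====
def Claim_equal_solution : Prop := ∀ (ingredient : List Int), Dom_solution ingredient → Spec_solution ingredient (solution ingredient)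

-- ===== LEMMAS AND PROOFS =====
-- unfolding equations for altLoop's dependent match
theorem altLoop_none {l : List Int} {a : Int} (h : removeFirst l = none) : altLoop l a = a := by
  unfold altLoop
  split
  · rfl
  · rename_i nxt hx
    rw [h] at hx
    cases hx

theorem altLoop_some {l m : List Int} {a : Int} (h : removeFirst l = some m) :
    altLoop l a = altLoop m (a + 1) := by
  conv_lhs => unfold altLoop
  split
  · rename_i hx
    rw [h] at hx
    cases hx
  · rename_i nxt hx
    rw [h] at hx
    cases hx
    rfl


theorem exists_last4 (l : List Int) (h : 4 ≤ l.length) :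
    ∃ w a b c d, l = w ++ [a, b, c, d] := by
  match hr : l.reverse with
  | d :: c :: b :: a :: t =>
    refine ⟨t.reverse, a, b, c, d, ?_⟩
    have : l = (d :: c :: b :: a :: t).reverse := by rw [← hr, List.reverse_reverse]
    simp [this]
  | [] | [_] | [_, _] | [_, _, _] =>
    exfalso
    have hlr := congrArg List.length hr
    rw [List.length_reverse] at hlr
    simp only [List.length_cons, List.length_nil] at hlr
    omega

theorem dropLast4_concat (w : List Int) :
    (w ++ [(1 : Int), 2, 3, 1]).dropLast.dropLast.dropLast.dropLast = w := by
  have e1 : w ++ [(1:Int), 2, 3, 1] = (w ++ [1, 2, 3]) ++ [1] := by simp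
  have e2 : w ++ [(1:Int), 2, 3] = (w ++ [1, 2]) ++ [3] := by simp
  have e3 : w ++ [(1:Int), 2] = (w ++ [1]) ++ [2] := by simp
  rw [e1, List.dropLast_concat, e2, List.dropLast_concat, e3, List.dropLast_concat,
      List.dropLast_concat]

theorem stepA_pop (w : List Int) (a : Int) :
    stepA (w ++ [1, 2, 3], a) 1 = (w, a + 1) := by
  have hfront : (w ++ [1, 2, 3] : List Int) ++ [1] = w ++ [1, 2, 3, 1] := by simp
  unfold stepA stepAFront
  simp only [hfront]
  have hlen : 4 ≤ (w ++ [(1 : Int), 2, 3, 1]).length := by simp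
  rw [if_pos hlen, if_pos]
  · rw [dropLast4_concat]
  · have hlw : (w ++ [(1:Int), 2, 3, 1]).length = w.length + 4 := by simp
    refine ⟨?_, ?_, ?_, ?_⟩
    · rw [PySem.List.pyGet?_neg_ofNat _ 1 (by omega) (by omega), hlw]
      simp
    · rw [PySem.List.pyGet?_neg_ofNat _ 2 (by omega) (by omega), hlw]
      simp
    · rw [PySem.List.pyGet?_neg_ofNat _ 3 (by omega) (by omega), hlw]
      simp
    · rw [PySem.List.pyGet?_neg_ofNat _ 4 (by omega) (by omega), hlw]
      simp

theorem stepA_push (f : List Int) (x : Int) (a : Int)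
    (h : ¬ ∃ w, f ++ [x] = w ++ [1, 2, 3, 1]) :
    stepA (f, a) x = (f ++ [x], a) := by
  unfold stepA stepAFront
  split
  case isTrue hlen =>
    rw [if_neg]
    rintro ⟨h1, h2, h3, h4⟩
    obtain ⟨w, p, q, r, s, hw⟩ := exists_last4 (f ++ [x]) hlen
    have hlw : (f ++ [x]).length = w.length + 4 := by rw [hw]; simp
    rw [hw] at h1 h2 h3 h4
    have hl4 : (w ++ [p, q, r, s]).length = w.length + 4 := by simp
    rw [PySem.List.pyGet?_neg_ofNat _ 1 (by omega) (by omega), hl4] at h1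
    rw [PySem.List.pyGet?_neg_ofNat _ 2 (by omega) (by omega), hl4] at h2
    rw [PySem.List.pyGet?_neg_ofNat _ 3 (by omega) (by omega), hl4] at h3
    rw [PySem.List.pyGet?_neg_ofNat _ 4 (by omega) (by omega), hl4] at h4
    simp at h1 h2 h3 h4
    exact h ⟨w, by rw [hw, h1, h2, h3, h4]⟩
  case isFalse => rfl

theorem stepA_add (f : List Int) (a : Int) (x : Int) :
    stepA (f, a) x = ((stepA (f, 0) x).1, a + (stepA (f, 0) x).2) := by
  unfold stepA stepAFront
  split
  · split
    · simp
    · simp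
  · simp

theorem foldl_stepA_add (xs : List Int) : ∀ (f : List Int) (a : Int),
    List.foldl stepA (f, a) xs =
      ((List.foldl stepA (f, 0) xs).1, a + (List.foldl stepA (f, 0) xs).2) := by
  induction xs with
  | nil => intro f a; simp
  | cons x xs ih =>
    intro f a
    simp only [List.foldl_cons]
    rw [stepA_add f a x, ih ((stepA (f, 0) x).1) (a + (stepA (f, 0) x).2)]
    rcases h : stepA (f, 0) x with ⟨f2, d⟩
    rw [ih f2 d]
    simp [Int.add_assoc]

theorem removeFirst_some_append : ∀ {u : List Int} {m : List Int} (z : List Int),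
    removeFirst u = some m → removeFirst (u ++ z) = some (m ++ z) := by
  intro u
  induction u with
  | nil => intro m z h; simp [removeFirst] at h
  | cons x rest ih =>
    intro m z h
    rw [removeFirst_cons] at h
    rw [show (x :: rest) ++ z = x :: (rest ++ z) from rfl, removeFirst_cons]
    split at h
    case isTrue ht =>
      have h4 : 4 ≤ (x :: rest).length := by
        have hmin : min 4 (x :: rest).length = 4 := by
          simpa [List.length_take] using congrArg List.length ht
        omega
      simp only [Option.some_inj] at h
      subst h
      rw [if_pos]
      · rw [show x :: (rest ++ z) = (x :: rest) ++ z from rfl,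
            List.drop_append_of_le_length (by omega)]
      · rw [show x :: (rest ++ z) = (x :: rest) ++ z from rfl,
            List.take_append_of_le_length (by omega)]
        exact ht
    case isFalse hf =>
      rcases Option.map_eq_some_iff.mp h with ⟨m2, hm2, rfl⟩
      have hlen := removeFirst_length hm2
      have h4 : 4 ≤ (x :: rest).length := by simp; omega
      rw [if_neg]
      · rw [ih z hm2]
        simp
      · rw [show x :: (rest ++ z) = (x :: rest) ++ z from rfl,
            List.take_append_of_le_length (by omega)]
        exact hf

theorem removeFirst_none_prefix {u z : List Int} (h : removeFirst (u ++ z) = none) :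
    removeFirst u = none := by
  cases hm : removeFirst u with
  | none => rfl
  | some m => rw [removeFirst_some_append z hm] at h; simp at h

theorem removeFirst_append_pat : ∀ (u v : List Int),
    removeFirst (u ++ [1, 2, 3]) = none →
    removeFirst (u ++ 1 :: 2 :: 3 :: 1 :: v) = some (u ++ v) := by
  intro u
  induction u with
  | nil => intro v _; simp [removeFirst]
  | cons x rest ih =>
    intro v h
    rw [show (x :: rest) ++ [(1:Int), 2, 3] = x :: (rest ++ [1, 2, 3]) from rfl,
       removeFirst_cons] at h
    rw [show (x :: rest) ++ (1:Int) :: 2 :: 3 :: 1 :: v = x :: (rest ++ 1 :: 2 :: 3 :: 1 :: v) from rfl,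
       removeFirst_cons]
    split at h
    case isTrue => simp at h
    case isFalse hf =>
      have hrest : removeFirst (rest ++ [1, 2, 3]) = none := by
        cases hr : removeFirst (rest ++ [1, 2, 3]) with
        | none => rfl
        | some m => rw [hr] at h; simp at h
      rw [if_neg]
      · rw [ih v hrest]
        rfl
      · intro hc
        match rest with
        | [] => simp at hc
        | [b] => simp at hc
        | [b, c] => simp at hc; exact absurd (by simp [hc.1, hc.2.1, hc.2.2]) hf
        | b :: c :: d :: rest2 =>
          apply hf
          rw [show x :: ((b :: c :: d :: rest2) ++ (1:Int) :: 2 :: 3 :: 1 :: v)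
                = (x :: b :: c :: d :: rest2) ++ (1:Int) :: 2 :: 3 :: 1 :: v from rfl,
             List.take_append_of_le_length (by simp)] at hc
          rw [show x :: ((b :: c :: d :: rest2) ++ [(1:Int), 2, 3])
                = (x :: b :: c :: d :: rest2) ++ [(1:Int), 2, 3] from rfl,
             List.take_append_of_le_length (by simp)]
          exact hc

theorem removeFirst_ext_none : ∀ {f : List Int} (x : Int),
    removeFirst f = none → (¬ ∃ w, f ++ [x] = w ++ [1, 2, 3, 1]) →
    removeFirst (f ++ [x]) = none := by
  intro f
  induction f with
  | nil =>
    intro x _ _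
    simp [removeFirst]
  | cons a f2 ih =>
    intro x h hw
    rw [removeFirst_cons] at h
    rw [show (a :: f2) ++ [x] = a :: (f2 ++ [x]) from rfl, removeFirst_cons]
    split at h
    case isTrue => simp at h
    case isFalse hf =>
      have hr : removeFirst f2 = none := by
        cases hr2 : removeFirst f2 with
        | none => rfl
        | some m => rw [hr2] at h; simp at h
      rw [if_neg]
      · rw [ih x hr (by
          rintro ⟨w, hweq⟩
          exact hw ⟨a :: w, by simp [hweq]⟩)]
        rfl
      · intro hc
        match f2 with
        | [] => simp at hc
        | [b] => simp at hc
        | [b, c] =>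
          simp at hc
          exact hw ⟨[], by simp [hc.1, hc.2.1, hc.2.2.1, hc.2.2.2]⟩
        | b :: c :: d :: rest2 =>
          apply hf
          rw [show a :: ((b :: c :: d :: rest2) ++ [x])
                = (a :: b :: c :: d :: rest2) ++ [x] from rfl,
             List.take_append_of_le_length (by simp)] at hc
          exact hc

theorem altLoop_add (n : Nat) : ∀ (l : List Int), l.length ≤ n → ∀ (a : Int),
    altLoop l a = a + altLoop l 0 := by
  induction n with
  | zero =>
    intro l hl a
    have : l = [] := by cases l <;> simp_all
    subst this
    rw [altLoop_none (by simp [removeFirst]), altLoop_none (by simp [removeFirst])]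
    ring
  | succ n ih =>
    intro l hl a
    cases h : removeFirst l with
    | none => rw [altLoop_none h, altLoop_none h]; ring
    | some m =>
      have hlen := removeFirst_length h
      rw [altLoop_some h, altLoop_some h, ih m (by omega) (a + 1), ih m (by omega) (0 + 1)]
      ring

theorem main_lemma : ∀ (xs f : List Int), removeFirst f = none →
    (List.foldl stepA (f, 0) xs).2 = altLoop (f ++ xs) 0 := by
  intro xs
  induction xs with
  | nil =>
    intro f hf
    simpa using (altLoop_none (a := 0) (by simpa using hf)).symm
  | cons x xs ih =>
    intro f hf
    simp only [List.foldl_cons]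
    by_cases hp : ∃ w, f ++ [x] = w ++ [1, 2, 3, 1]
    · obtain ⟨w, hw⟩ := hp
      have hx : x = 1 ∧ f = w ++ [1, 2, 3] := by
        have hW : f ++ [x] = (w ++ [1, 2, 3]) ++ [1] := by simpa using hw
        have hinj := List.append_inj' hW (by rfl)
        refine ⟨?_, hinj.1⟩
        simpa using hinj.2
      obtain ⟨rfl, rfl⟩ := hx
      rw [stepA_pop w 0]
      have hwnone : removeFirst w = none := removeFirst_none_prefix hf
      simp only [zero_add]
      rw [foldl_stepA_add xs w 1, ih w hwnone]
      have hsplit : ((w ++ [1, 2, 3]) ++ 1 :: xs : List Int) = w ++ 1 :: 2 :: 3 :: 1 :: xs := by simp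
      rw [hsplit]
      rw [altLoop_some (removeFirst_append_pat w xs hf)]
      rw [altLoop_add (w ++ xs).length (w ++ xs) le_rfl (0 + 1)]
      simp
    · rw [stepA_push f x 0 hp]
      rw [ih (f ++ [x]) (removeFirst_ext_none x hf hp)]
      simp

-- ===== VERDICT (by name: the statement is the Claim_ definition above) =====
theorem solution_spec : Claim_equal_solution := by
  intro ingredient _
  unfold Spec_solution solution solution_alt
  have := main_lemma ingredient [] (by simp [removeFirst])
  simpa using this
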